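-- pv_equiv track=rewrite | github.com/stranavad/IVT_23-24 | maze_bfs/maze_01.py | get_updated_position_on_directions
-- ===== SOURCE A (Python) =====
-- def get_updated_position_on_direction(position: tuple[int, int], direction: str) -> tuple[int, int]:
--     if direction == "U":
--         return position[0], position[1] - 1
--     elif direction == "D":
--         return position[0], position[1] + 1
--     elif direction == "R":
--         return position[0] + 1, position[1]
--     elif direction == "L":
--         return position[0] - 1, position[1]
--
--     return position
--
-- def get_updated_position_on_directions(position: tuple[int, int], directions: str) -> tuple[
--     tuple[int, int], list[tuple[int, int]]]:
--     visited_positions: list[tuple[int, int]] = []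
--     updated_position = position
--
--     for direction in directions:
--         updated_position = get_updated_position_on_direction(updated_position, direction)
--         visited_positions.append(updated_position)
--
--     return updated_position, visited_positions
-- ===== SOURCE B (Python) =====
-- def _axis_prefix(directions, plus, minus):
--     sums = [0]
--     for c in directions:
--         sums.append(sums[-1] + (1 if c == plus else -1 if c == minus else 0))
--     return sums
--
-- def get_updated_position_on_directions(position, directions):
--     xs = _axis_prefix(directions, "R", "L")
--     ys = _axis_prefix(directions, "D", "U")
--     visited = [(position[0] + dx, position[1] + dy) for dx, dy in zip(xs[1:], ys[1:])]
--     return (visited[-1] if visited else position), visited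
-- ===== Notes on version B (the rewrite author's own statement) =====
-- stated objective: alternative
-- what changed: Decomposes the walk per axis: two independent integer prefix-sum passes (one for R/L, one for D/U) over the direction string, then a zip-and-translate pass adds the start position to each prefix displacement; no running position tuple or per-step helper dispatch remains.
import Mathlib
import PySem

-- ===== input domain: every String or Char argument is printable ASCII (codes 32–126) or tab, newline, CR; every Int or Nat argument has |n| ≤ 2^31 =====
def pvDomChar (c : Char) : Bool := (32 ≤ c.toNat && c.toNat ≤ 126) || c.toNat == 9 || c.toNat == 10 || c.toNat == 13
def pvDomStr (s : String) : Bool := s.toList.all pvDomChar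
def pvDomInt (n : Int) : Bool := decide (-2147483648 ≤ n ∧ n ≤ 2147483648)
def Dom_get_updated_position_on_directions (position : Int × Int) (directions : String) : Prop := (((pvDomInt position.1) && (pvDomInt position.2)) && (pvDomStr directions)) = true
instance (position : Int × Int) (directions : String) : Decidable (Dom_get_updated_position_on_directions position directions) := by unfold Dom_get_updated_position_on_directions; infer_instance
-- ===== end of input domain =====

-- ===== PORT A =====
-- B replaces A's running-position loop by two independent per-axis prefix-sum passes plus a
-- zip-and-translate pass; same asymptotic cost ("alternative").
def get_updated_position_on_direction (position : Int × Int) (direction : Char) : Int × Int :=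
  if direction = 'U' then (position.1, position.2 - 1)
  else if direction = 'D' then (position.1, position.2 + 1)
  else if direction = 'R' then (position.1 + 1, position.2)
  else if direction = 'L' then (position.1 - 1, position.2)
  else position

def get_updated_position_on_directions (position : Int × Int) (directions : String) : (Int × Int) × (List (Int × Int)) :=
  let st := directions.toList.foldl
    (fun (st : (Int × Int) × List (Int × Int)) direction =>
      let updated := get_updated_position_on_direction st.1 direction
      (updated, st.2 ++ [updated]))
    (position, [])
  (st.1, st.2)

-- ===== PORT B =====
-- helper _axis_prefix of Source B; sums[-1] via pyGet? (-1), exact here since sums is never empty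
def pvAxisPrefix (directions : List Char) (plus minus : Char) : List Int :=
  directions.foldl
    (fun sums c =>
      sums ++ [(PySem.List.pyGet? sums (-1)).getD 0 + (if c = plus then 1 else if c = minus then -1 else 0)])
    [0]

def get_updated_position_on_directions_alt (position : Int × Int) (directions : String) : (Int × Int) × (List (Int × Int)) :=
  let xs := pvAxisPrefix directions.toList 'R' 'L'
  let ys := pvAxisPrefix directions.toList 'D' 'U'
  let visited := (List.zip (PySem.List.slice xs (some 1) none) (PySem.List.slice ys (some 1) none)).map
    (fun d => (position.1 + d.1, position.2 + d.2))
  -- 'visited[-1] if visited else position': [-1] of a nonempty list is its last element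
  ((match visited.getLast? with | some v => v | none => position), visited)

-- ===== PRECONDITION & SPEC =====
def Spec_get_updated_position_on_directions (position : Int × Int) (directions : String) (out : (Int × Int) × (List (Int × Int))) : Prop := out = get_updated_position_on_directions_alt position directions
instance (position : Int × Int) (directions : String) (out : (Int × Int) × (List (Int × Int))) : Decidable (Spec_get_updated_position_on_directions position directions out) := by unfold Spec_get_updated_position_on_directions; infer_instance

-- ===== CLAIM (what is proved, stated in full; the proofs are below) =====
def Claim_equal_get_updated_position_on_directions : Prop := ∀ (position : Int × Int) (directions : String), Dom_get_updated_position_on_directions position directions → Spec_get_updated_position_on_directions position directions (get_updated_position_on_directions position directions)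

-- ===== LEMMAS AND PROOFS =====

-- per-axis deltas
def pvDX (c : Char) : Int := if c = 'R' then 1 else if c = 'L' then -1 else 0
def pvDY (c : Char) : Int := if c = 'D' then 1 else if c = 'U' then -1 else 0

theorem pv_step (p : Int × Int) (c : Char) :
    get_updated_position_on_direction p c = (p.1 + pvDX c, p.2 + pvDY c) := by
  unfold get_updated_position_on_direction pvDX pvDY
  by_cases hU : c = 'U' <;> by_cases hD : c = 'D' <;> by_cases hR : c = 'R' <;> by_cases hL : c = 'L' <;>
    simp_all [Prod.ext_iff] <;> omega

theorem pv_slice1 (l : List Int) : PySem.List.slice l (some 1) none = l.drop 1 := by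
  simpa using PySem.List.slice_from_natCast l 1

-- the axis foldl of Source B builds a scanl of running sums
theorem pv_axis_foldl (d : Char → Int) :
    ∀ (cs : List Char) (pre : List Int) (s : Int),
      cs.foldl (fun sums c => sums ++ [(PySem.List.pyGet? sums (-1)).getD 0 + d c]) (pre ++ [s])
        = pre ++ cs.scanl (fun a c => a + d c) s := by
  intro cs
  induction cs with
  | nil => intro pre s; simp
  | cons c cs ih =>
    intro pre s
    rw [List.foldl_cons]
    have h : (PySem.List.pyGet? (pre ++ [s]) (-1)).getD 0 = s := by
      simp [PySem.List.pyGet?_neg_one]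
    rw [h, ih (pre ++ [s]) (s + d c), List.scanl_cons]
    simp

theorem pv_axisPrefix_eq (d : Char → Int) (plus minus : Char)
    (hd : ∀ c, d c = if c = plus then 1 else if c = minus then -1 else 0) (cs : List Char) :
    pvAxisPrefix cs plus minus = cs.scanl (fun a c => a + d c) 0 := by
  unfold pvAxisPrefix
  have h := pv_axis_foldl d cs [] 0
  simp only [List.nil_append] at h
  rw [← h]
  congr 1
  funext sums c
  rw [hd]

theorem pv_scanl_shift (d : Char → Int) :
    ∀ (cs : List Char) (t s : Int),
      (List.scanl (fun a c => a + d c) s cs).map (fun x => t + x)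
        = List.scanl (fun a c => a + d c) (t + s) cs := by
  intro cs
  induction cs with
  | nil => intro t s; simp
  | cons c cs ih =>
    intro t s
    rw [List.scanl_cons, List.scanl_cons, List.map_cons, ih t (s + d c)]
    congr 2
    omega

theorem pv_zip_scanl :
    ∀ (cs : List Char) (p : Int × Int),
      List.zip (List.scanl (fun a c => a + pvDX c) p.1 cs) (List.scanl (fun a c => a + pvDY c) p.2 cs)
        = List.scanl get_updated_position_on_direction p cs := by
  intro cs
  induction cs with
  | nil => intro p; simp
  | cons c cs ih =>
    intro p
    rw [List.scanl_cons, List.scanl_cons, List.scanl_cons, List.zip_cons_cons]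
    congr 1
    have h := ih (p.1 + pvDX c, p.2 + pvDY c)
    rw [pv_step]
    exact h

theorem pv_zip_map (cs : List Char) (p : Int × Int) (sx sy : Int) :
    (List.zip (List.scanl (fun a c => a + pvDX c) sx cs) (List.scanl (fun a c => a + pvDY c) sy cs)).map
        (fun d => (p.1 + d.1, p.2 + d.2))
      = List.scanl get_updated_position_on_direction (p.1 + sx, p.2 + sy) cs := by
  have ht : (fun d : Int × Int => (p.1 + d.1, p.2 + d.2))
      = Prod.map (fun x => p.1 + x) (fun x => p.2 + x) := rfl
  rw [ht, ← List.zip_map, pv_scanl_shift, pv_scanl_shift]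
  exact pv_zip_scanl cs (p.1 + sx, p.2 + sy)

theorem pv_scanl_head (f : (Int × Int) → Char → (Int × Int)) (cs : List Char) (q : Int × Int) :
    List.scanl f q cs = q :: (List.scanl f q cs).tail := by
  cases cs <;> simp

theorem pv_foldA :
    ∀ (cs : List Char) (p : Int × Int) (acc : List (Int × Int)),
      cs.foldl
        (fun (st : (Int × Int) × List (Int × Int)) direction =>
          let updated := get_updated_position_on_direction st.1 direction
          (updated, st.2 ++ [updated]))
        (p, acc)
        = (cs.foldl get_updated_position_on_direction p,
           acc ++ (List.scanl get_updated_position_on_direction p cs).drop 1) := by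
  intro cs
  induction cs with
  | nil => intro p acc; simp
  | cons c cs ih =>
    intro p acc
    rw [List.foldl_cons]
    simp only []
    rw [ih (get_updated_position_on_direction p c) (acc ++ [get_updated_position_on_direction p c])]
    conv_rhs => rw [List.foldl_cons, List.scanl_cons, List.drop_one, List.tail_cons,
      pv_scanl_head get_updated_position_on_direction cs (get_updated_position_on_direction p c)]
    simp

theorem pv_last_scanl (f : (Int × Int) → Char → (Int × Int)) :
    ∀ (cs : List Char) (q x : Int × Int),
      ((List.scanl f q cs).getLast?).getD x = cs.foldl f q := by
  intro cs
  induction cs with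
  | nil => intro q x; simp
  | cons c cs ih =>
    intro q x
    rw [List.scanl_cons]
    cases cs with
    | nil => simp
    | cons c2 cs2 =>
      rw [List.scanl_cons, List.getLast?_cons_cons, ← List.scanl_cons, ih (f q c) x]
      simp

theorem pv_match_getD (x : Option (Int × Int)) (p : Int × Int) :
    (match x with | some v => v | none => p) = x.getD p := by
  cases x <;> rfl

theorem pv_final (cs : List Char) (p : Int × Int) :
    (match ((List.scanl get_updated_position_on_direction p cs).drop 1).getLast? with
      | some v => v | none => p) = List.foldl get_updated_position_on_direction p cs := by
  rw [pv_match_getD]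
  cases cs with
  | nil => simp
  | cons c cs2 =>
    rw [List.scanl_cons, List.drop_one, List.tail_cons, List.foldl_cons]
    exact pv_last_scanl get_updated_position_on_direction cs2 (get_updated_position_on_direction p c) p

-- ===== VERDICT (by name: the statement is the Claim_ definition above) =====
theorem get_updated_position_on_directions_spec : Claim_equal_get_updated_position_on_directions := by
  intro position directions _
  unfold Spec_get_updated_position_on_directions get_updated_position_on_directions get_updated_position_on_directions_alt
  simp only []
  rw [pv_foldA]
  rw [pv_axisPrefix_eq pvDX 'R' 'L' (fun c => rfl), pv_axisPrefix_eq pvDY 'D' 'U' (fun c => rfl)]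
  rw [pv_slice1, pv_slice1]
  set cs := directions.toList with hcs
  have hvis : (List.zip ((List.scanl (fun a c => a + pvDX c) (0 : Int) cs).drop 1)
        ((List.scanl (fun a c => a + pvDY c) (0 : Int) cs).drop 1)).map
        (fun d => (position.1 + d.1, position.2 + d.2))
      = (List.scanl get_updated_position_on_direction position cs).drop 1 := by
    cases cs with
    | nil => simp
    | cons c cs2 =>
      rw [List.scanl_cons, List.scanl_cons, List.scanl_cons,
          List.drop_one, List.drop_one, List.drop_one, List.tail_cons, List.tail_cons, List.tail_cons]
      rw [pv_zip_map cs2 position (0 + pvDX c) (0 + pvDY c), pv_step]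
      norm_num
  rw [hvis]
  simp only [List.nil_append]
  rw [Prod.ext_iff]
  exact ⟨pv_final cs position ▸ rfl, rfl⟩
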